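-- pv_equiv track=rewrite | github.com/miguelvps/pi | common/search.py | match_keywords_to_something
-- ===== SOURCE A (Python) =====
-- def match_keywords_to_something(query, l):
--     '''given a query and a list of tuples in the form
--     ((K1,K2,...), something)
--     where Kn are keywords and something is what you want returned,
--     matches the query to the keywords and returns a list of tuples in
--     the form
--     (processed_query, something)
--     where processed_query is the query without the matched keyword'''
--     result=[]
--     for keywords, v in l:
--         splited_query= query.split(' ')
--         for keyword in keywords:
--             try:
--                 i= splited_query.index(keyword)
--                 processed_query_splitted= splited_query[:]
--                 processed_query_splitted.pop(i)
--                 processed_query= " ".join(processed_query_splitted)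
--                 result.append( (processed_query, v) )
--             except:
--                 pass    #no match
--     return result
-- ===== SOURCE B (Python) =====
-- def match_keywords_to_something(query, l):
--     words = query.split(' ')
--     n = len(words)
--     # Pass 1, right to left: suf is the running join ' '.join(words[j:]);
--     # suf_after[w] ends up holding ' '.join of the words AFTER w's first occurrence.
--     suf_after = {}
--     suf = ''
--     for j, w in reversed(list(enumerate(words))):
--         suf_after[w] = suf
--         suf = w if j == n - 1 else w + ' ' + suf
--     # Pass 2, left to right: pre is the running join ' '.join(words[:i]);
--     # at each word's first occurrence stitch pre and suf_after together.
--     removed = {}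
--     pre = ''
--     for i, w in enumerate(words):
--         if w not in removed:
--             if i == 0:
--                 removed[w] = suf_after[w]
--             elif i == n - 1:
--                 removed[w] = pre
--             else:
--                 removed[w] = pre + ' ' + suf_after[w]
--         pre = w if i == 0 else pre + ' ' + w
--     return [(removed[kw], v) for keywords, v in l for kw in keywords if kw in removed]
-- ===== Notes on version B (the rewrite author's own statement) =====
-- stated objective: faster
-- what changed: B replaces A's per-keyword split+index+pop+join with a two-pass dynamic program over the query words: a right-to-left pass accumulating suffix joins into a word-keyed dict and a left-to-right pass accumulating the prefix join and stitching the two at each word's first occurrence, so each keyword costs one O(1) dict lookup instead of an O(n) scan and join.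
import Mathlib
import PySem

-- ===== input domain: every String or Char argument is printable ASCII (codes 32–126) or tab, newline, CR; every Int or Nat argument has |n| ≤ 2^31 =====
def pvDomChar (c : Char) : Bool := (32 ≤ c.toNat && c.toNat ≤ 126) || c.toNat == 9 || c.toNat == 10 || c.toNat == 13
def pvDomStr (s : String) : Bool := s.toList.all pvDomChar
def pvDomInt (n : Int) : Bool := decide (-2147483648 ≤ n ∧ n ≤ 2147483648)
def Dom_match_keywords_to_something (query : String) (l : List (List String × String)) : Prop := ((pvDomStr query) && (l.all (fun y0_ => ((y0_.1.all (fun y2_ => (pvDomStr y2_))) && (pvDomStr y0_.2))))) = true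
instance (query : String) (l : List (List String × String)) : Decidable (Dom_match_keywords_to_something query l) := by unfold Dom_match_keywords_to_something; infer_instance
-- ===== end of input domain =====

-- B replaces A's per-keyword split+index+pop+join with a two-pass prefix/suffix dynamic
-- program over the query words plus one comprehension over l; objective: faster (measured
-- faster in a timing run).

-- ===== PORT A =====
def match_keywords_to_something (query : String) (l : List (List String × String)) : List (String × String) :=
  l.foldl (fun result kv =>
    let splited_query := (PySem.Str.split? query " ").getD []   -- ' ' is a nonempty separator, so split? is always `some`
    kv.1.foldl (fun result keyword =>
      match PySem.List.index? splited_query keyword with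
      | some i =>
        -- splited_query[:] then .pop(i); i is a valid index from .index, so pop? is always `some`
        match PySem.List.pop? splited_query (i : Int) with
        | some (_, processed_query_splitted) =>
            result ++ [(PySem.Str.join " " processed_query_splitted, kv.2)]
        | none => result
      | none => result) result) []

-- ===== PORT B =====
-- pass-1 loop body: `suf_after[w] = suf; suf = w if j == n - 1 else w + ' ' + suf`
def pvStep1 (n : Int) (st : PySem.Dict String String × String) (jw : Int × String) :
    PySem.Dict String String × String :=
  (st.1.insert jw.2 st.2, if jw.1 == n - 1 then jw.2 else jw.2 ++ " " ++ st.2)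

-- pass-2 loop body: fill `removed` at a word's first occurrence, then extend `pre`
-- (`suf_after[w]` is read as getD "": pass 1 visited every word, so the key is always present)
def pvStep2 (n : Int) (suf_after : PySem.Dict String String)
    (st : PySem.Dict String String × String) (iw : Int × String) :
    PySem.Dict String String × String :=
  (if st.1.contains iw.2 then st.1
   else if iw.1 == 0 then st.1.insert iw.2 ((suf_after.get? iw.2).getD "")
   else if iw.1 == n - 1 then st.1.insert iw.2 st.2
   else st.1.insert iw.2 (st.2 ++ " " ++ (suf_after.get? iw.2).getD ""),
   if iw.1 == 0 then iw.2 else st.2 ++ " " ++ iw.2)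

def match_keywords_to_something_alt (query : String) (l : List (List String × String)) : List (String × String) :=
  let words := (PySem.Str.split? query " ").getD []   -- ' ' is a nonempty separator, so split? is always `some`
  let n : Int := words.length
  let suf_after := ((PySem.List.enumerate words 0).reverse.foldl (pvStep1 n) (PySem.Dict.empty, "")).1
  let removed := ((PySem.List.enumerate words 0).foldl (pvStep2 n suf_after) (PySem.Dict.empty, "")).1
  l.flatMap (fun kv => kv.1.filterMap (fun kw => (removed.get? kw).map (fun s => (s, kv.2))))

-- ===== PRECONDITION & SPEC =====
def Spec_match_keywords_to_something (query : String) (l : List (List String × String)) (out : List (String × String)) : Prop := out = match_keywords_to_something_alt query l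
instance (query : String) (l : List (List String × String)) (out : List (String × String)) : Decidable (Spec_match_keywords_to_something query l out) := by unfold Spec_match_keywords_to_something; infer_instance

-- ===== CLAIM (what is proved, stated in full; the proofs are below) =====
def Claim_equal_match_keywords_to_something : Prop := ∀ (query : String) (l : List (List String × String)), Dom_match_keywords_to_something query l → Spec_match_keywords_to_something query l (match_keywords_to_something query l)

-- ===== LEMMAS AND PROOFS =====

-- `' '.join` facts, lifted to String from the PySem.Chars lemmas
theorem pvJoin_nil : PySem.Str.join " " [] = "" := by
  rw [← String.toList_inj]; simp [PySem.Str.toList_join, PySem.Chars.join_nil]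

theorem pvJoin_singleton (x : String) : PySem.Str.join " " [x] = x := by
  rw [← String.toList_inj]; simp [PySem.Str.toList_join, PySem.Chars.join_singleton]

theorem pvJoin_cons (x : String) (t : List String) (ht : t ≠ []) :
    PySem.Str.join " " (x :: t) = x ++ " " ++ PySem.Str.join " " t := by
  cases t with
  | nil => exact absurd rfl ht
  | cons y r =>
    rw [← String.toList_inj]
    simp [PySem.Str.toList_join, PySem.Chars.join_cons_cons]

theorem pvJoin_append (a b : List String) (ha : a ≠ []) (hb : b ≠ []) :
    PySem.Str.join " " (a ++ b) = PySem.Str.join " " a ++ " " ++ PySem.Str.join " " b := by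
  induction a with
  | nil => exact absurd rfl ha
  | cons x a' ih =>
    cases a' with
    | nil => simp [pvJoin_singleton, pvJoin_cons x b hb]
    | cons y r =>
      rw [List.cons_append, pvJoin_cons x ((y :: r) ++ b) (by simp),
          pvJoin_cons x (y :: r) (by simp), ih (by simp)]
      simp [String.append_assoc]

-- first-occurrence index across an append
theorem pvIndex?_append {α : Type} [BEq α] [LawfulBEq α] (a b : List α) (u : α) :
    PySem.List.index? (a ++ b) u =
      ((PySem.List.index? a u).orElse (fun _ => (PySem.List.index? b u).map (· + a.length))) := by
  induction a with
  | nil => simp [PySem.List.index?_eq_idxOf?, Option.orElse]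
  | cons x a' ih =>
    by_cases hx : x = u
    · subst hx
      rw [List.cons_append, PySem.List.index?_cons_self, PySem.List.index?_cons_self]
      simp [Option.orElse]
    · rw [List.cons_append, PySem.List.index?_cons_of_ne _ hx, PySem.List.index?_cons_of_ne _ hx, ih]
      cases PySem.List.index? a' u with
      | some k => simp [Option.orElse]
      | none =>
        cases PySem.List.index? b u with
        | none => simp [Option.orElse]
        | some k => simp [Option.orElse]; omega

-- pass 1: folding pvStep1 right-to-left over the enumerated suffix yields the suffix join and
-- a dict sending each word to the join of the words after its first occurrence
theorem pvPass1 (n : Int) :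
    ∀ (ws : List String) (s : Int), s + ws.length = n →
      (((PySem.List.enumerate ws s).foldr (fun jw st => pvStep1 n st jw)
          (PySem.Dict.empty, "")).2 = PySem.Str.join " " ws)
      ∧ ∀ u, ((PySem.List.enumerate ws s).foldr (fun jw st => pvStep1 n st jw)
          (PySem.Dict.empty, "")).1.get? u
        = (PySem.List.index? ws u).map (fun t => PySem.Str.join " " (ws.drop (t + 1))) := by
  intro ws
  induction ws with
  | nil =>
    intro s _
    rw [PySem.List.enumerate_nil]
    constructor
    · simp [List.foldr_nil, pvJoin_nil]
    · intro u
      simp [List.foldr_nil, PySem.Dict.get?_empty, PySem.List.index?_eq_idxOf?]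
  | cons w rest ih =>
    intro s hs
    rw [PySem.List.enumerate_cons, List.foldr_cons]
    have hs' : s + 1 + (rest.length : Int) = n := by
      simp at hs; omega
    obtain ⟨ih2, ih1⟩ := ih (s + 1) hs'
    set r := (PySem.List.enumerate rest (s + 1)).foldr (fun jw st => pvStep1 n st jw)
      (PySem.Dict.empty, "") with hr
    constructor
    · show (if s == n - 1 then w else w ++ " " ++ r.2) = _
      cases rest with
      | nil =>
        have : s = n - 1 := by simp at hs; omega
        simp [this, pvJoin_singleton]
      | cons y t =>
        have hne : ¬ (s == n - 1) := by
          simp at hs' ⊢; omega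
        rw [if_neg hne, ih2, pvJoin_cons w (y :: t) (by simp)]
    · intro u
      show (r.1.insert w r.2).get? u = _
      by_cases hu : u = w
      · subst hu
        rw [PySem.Dict.get?_insert_self, ih2, PySem.List.index?_cons_self]
        simp
      · rw [PySem.Dict.get?_insert_of_ne _ _ hu, ih1 u,
            PySem.List.index?_cons_of_ne _ (fun h => hu h.symm)]
        cases PySem.List.index? rest u with
        | none => simp
        | some t => simp

-- pass 2: folding pvStep2 left-to-right completes `removed` into the full first-occurrence map
theorem pvPass2 (full : List String) (sufd : PySem.Dict String String)
    (hsuf : ∀ u, sufd.get? u =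
      (PySem.List.index? full u).map (fun t => PySem.Str.join " " (full.drop (t + 1)))) :
    ∀ (tl pref : List String) (d : PySem.Dict String String) (pre : String),
      full = pref ++ tl →
      pre = PySem.Str.join " " pref →
      (∀ u, d.get? u = (PySem.List.index? pref u).map
          (fun k => PySem.Str.join " " (full.take k ++ full.drop (k + 1)))) →
      ∀ u, ((PySem.List.enumerate tl (pref.length : Int)).foldl
              (pvStep2 (full.length : Int) sufd) (d, pre)).1.get? u
        = (PySem.List.index? full u).map
            (fun k => PySem.Str.join " " (full.take k ++ full.drop (k + 1))) := by
  intro tl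
  induction tl with
  | nil =>
    intro pref d pre hfull hpre hd u
    rw [PySem.List.enumerate_nil, List.foldl_nil]
    rw [hd u, hfull, List.append_nil]
  | cons w tl' ih =>
    intro pref d pre hfull hpre hd u
    rw [PySem.List.enumerate_cons, List.foldl_cons]
    have hstep : pvStep2 (full.length : Int) sufd (d, pre) ((pref.length : Int), w)
        = (if d.contains w then d
           else if (pref.length : Int) == 0 then d.insert w ((sufd.get? w).getD "")
           else if (pref.length : Int) == (full.length : Int) - 1 then d.insert w pre
           else d.insert w (pre ++ " " ++ (sufd.get? w).getD ""),
           if (pref.length : Int) == 0 then w else pre ++ " " ++ w) := rfl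
    have hlen : ((pref ++ [w]).length : Int) = (pref.length : Int) + 1 := by simp
    have hfull' : full = (pref ++ [w]) ++ tl' := by rw [hfull]; simp
    have hpre' : (if (pref.length : Int) == 0 then w else pre ++ " " ++ w)
        = PySem.Str.join " " (pref ++ [w]) := by
      cases pref with
      | nil => simp [pvJoin_singleton]
      | cons p ps =>
        have : ¬ ((((p :: ps).length : Nat) : Int) == 0) := by
          simp only [beq_iff_eq, List.length_cons]; push_cast; omega
        rw [if_neg this, hpre, pvJoin_append (p :: ps) [w] (by simp) (by simp), pvJoin_singleton]
    have hidx_ne : ∀ u, u ≠ w → PySem.List.index? (pref ++ [w]) u = PySem.List.index? pref u := by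
      intro u hu
      rw [pvIndex?_append]
      have : PySem.List.index? [w] u = none := by
        rw [PySem.List.index?_eq_idxOf?]
        simp [List.idxOf?_cons]
        exact fun h => hu h.symm
      rw [this]
      cases PySem.List.index? pref u <;> simp [Option.orElse]
    have htake : full.take pref.length = pref := by rw [hfull']; simp [List.take_left']
    have hdrop : full.drop (pref.length + 1) = tl' := by
      rw [hfull']
      have : pref.length + 1 = (pref ++ [w]).length := by simp
      rw [this, List.drop_left]
    by_cases hc : d.contains w
    · -- w already seen: dict unchanged
      have hd' : ∀ u', d.get? u' = (PySem.List.index? (pref ++ [w]) u').map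
          (fun k => PySem.Str.join " " (full.take k ++ full.drop (k + 1))) := by
        intro u'
        by_cases hu : u' = w
        · subst hu
          have h2 : (d.get? u').isSome := by rw [← PySem.Dict.contains_eq_isSome_get?]; exact hc
          rw [hd u'] at h2
          cases hk : PySem.List.index? pref u' with
          | none => rw [hk] at h2; simp at h2
          | some k =>
            rw [hd u', hk, pvIndex?_append, hk]
            simp [Option.orElse]
        · rw [hd u', hidx_ne u' hu]
      have := ih (pref ++ [w]) d _ hfull' hpre' hd' u
      rw [hlen] at this
      rw [hstep, if_pos hc]
      exact this
    · -- first occurrence of w: insert the stitched string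
      have hnone : PySem.List.index? pref w = none := by
        cases hk : PySem.List.index? pref w with
        | none => rfl
        | some k =>
          exfalso
          have h2 : (d.get? w).isSome := by rw [hd w, hk]; simp
          rw [← PySem.Dict.contains_eq_isSome_get?] at h2
          exact hc h2
      have hidxfull : PySem.List.index? full w = some pref.length := by
        rw [hfull, pvIndex?_append, hnone, PySem.List.index?_cons_self]
        simp [Option.orElse]
      have hsufw : (sufd.get? w).getD "" = PySem.Str.join " " tl' := by
        rw [hsuf w, hidxfull]
        simp only [Option.map_some, Option.getD_some]
        rw [hdrop]
      have hval : (if d.contains w then d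
           else if (pref.length : Int) == 0 then d.insert w ((sufd.get? w).getD "")
           else if (pref.length : Int) == (full.length : Int) - 1 then d.insert w pre
           else d.insert w (pre ++ " " ++ (sufd.get? w).getD ""))
          = d.insert w (PySem.Str.join " "
              (full.take pref.length ++ full.drop (pref.length + 1))) := by
        rw [if_neg hc, htake, hdrop]
        cases pref with
        | nil =>
          simp only [List.length_nil, Int.natCast_zero, beq_self_eq_true, if_true,
            List.nil_append]
          rw [hsufw]
        | cons p ps =>
          have h0 : ¬ ((((p :: ps).length : Nat) : Int) == 0) := by
            simp only [beq_iff_eq, List.length_cons]; push_cast; omega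
          rw [if_neg h0]
          cases tl' with
          | nil =>
            have hl : full.length = (p :: ps).length + 1 := by rw [hfull]; simp
            have : ((((p :: ps).length : Nat) : Int) == (full.length : Int) - 1) := by
              simp only [List.length_cons] at hl
              simp only [beq_iff_eq, List.length_cons]; omega
            rw [if_pos this, hpre, List.append_nil]
          | cons y t =>
            have hl : full.length = (p :: ps).length + 1 + (y :: t).length := by
              rw [hfull]; simp; omega
            have : ¬ ((((p :: ps).length : Nat) : Int) == (full.length : Int) - 1) := by
              simp only [List.length_cons] at hl
              simp only [beq_iff_eq, List.length_cons]; omega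
            rw [if_neg this, hpre, hsufw,
                pvJoin_append (p :: ps) (y :: t) (by simp) (by simp)]
      have hd' : ∀ u', (d.insert w (PySem.Str.join " "
            (full.take pref.length ++ full.drop (pref.length + 1)))).get? u'
          = (PySem.List.index? (pref ++ [w]) u').map
            (fun k => PySem.Str.join " " (full.take k ++ full.drop (k + 1))) := by
        intro u'
        by_cases hu : u' = w
        · subst hu
          rw [PySem.Dict.get?_insert_self, pvIndex?_append, hnone, PySem.List.index?_cons_self]
          simp [Option.orElse]
        · rw [PySem.Dict.get?_insert_of_ne _ _ hu, hd u', hidx_ne u' hu]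
      have := ih (pref ++ [w]) _ _ hfull' hpre' hd' u
      rw [hlen] at this
      rw [hstep, hval]
      exact this

-- A's inner step: found keyword at index i ⇒ pop i succeeds and leaves take i ++ drop (i+1)
theorem pvPopA (ws : List String) (kw : String) (i : Nat)
    (h : PySem.List.index? ws kw = some i) :
    PySem.List.pop? ws (i : Int) =
      some (ws[i]'(PySem.List.getElem_of_index?_eq_some h).1, ws.take i ++ ws.drop (i + 1)) := by
  obtain ⟨hi, -, -⟩ := PySem.List.getElem_of_index?_eq_some h
  rw [PySem.List.pop?_natCast (h := hi)]
  rw [List.eraseIdx_eq_take_drop_succ]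

-- A's inner loop over one tuple's keywords, as an append of a filterMap
theorem pvInnerA (ws : List String) (v : String) (kws : List String) :
    ∀ acc, kws.foldl (fun result keyword =>
      match PySem.List.index? ws keyword with
      | some i =>
        match PySem.List.pop? ws (i : Int) with
        | some (_, processed_query_splitted) =>
            result ++ [(PySem.Str.join " " processed_query_splitted, v)]
        | none => result
      | none => result) acc
    = acc ++ kws.filterMap (fun kw => (PySem.List.index? ws kw).map
        (fun i => (PySem.Str.join " " (ws.take i ++ ws.drop (i + 1)), v))) := by
  induction kws with
  | nil => intro acc; simp
  | cons kw kws ih =>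
    intro acc
    rw [List.foldl_cons, List.filterMap_cons]
    cases h : PySem.List.index? ws kw with
    | none => rw [ih]; simp
    | some i =>
      simp only [pvPopA ws kw i h]
      rw [ih]
      simp

-- ===== VERDICT (by name: the statement is the Claim_ definition above) =====
theorem match_keywords_to_something_spec : Claim_equal_match_keywords_to_something := by
  intro query l _
  unfold Spec_match_keywords_to_something match_keywords_to_something match_keywords_to_something_alt
  set ws := (PySem.Str.split? query " ").getD [] with hws
  set n : Int := (ws.length : Int) with hn
  -- pass 1 gives the suffix-join dict
  have hsufd : ∀ u, (((PySem.List.enumerate ws 0).reverse.foldl (pvStep1 n)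
        (PySem.Dict.empty, "")).1).get? u
      = (PySem.List.index? ws u).map (fun t => PySem.Str.join " " (ws.drop (t + 1))) := by
    intro u
    rw [List.foldl_reverse]
    exact (pvPass1 n ws 0 (by omega)).2 u
  -- pass 2 completes the first-occurrence map
  have hremoved : ∀ u, (((PySem.List.enumerate ws 0).foldl
        (pvStep2 n (((PySem.List.enumerate ws 0).reverse.foldl (pvStep1 n)
          (PySem.Dict.empty, "")).1)) (PySem.Dict.empty, "")).1).get? u
      = (PySem.List.index? ws u).map
          (fun k => PySem.Str.join " " (ws.take k ++ ws.drop (k + 1))) := by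
    intro u
    have h0 : (PySem.Dict.empty : PySem.Dict String String).get? u = none :=
      PySem.Dict.get?_empty u
    have := pvPass2 ws _ hsufd ws [] PySem.Dict.empty "" (by simp) pvJoin_nil.symm
      (by intro u'; simp [PySem.Dict.get?_empty, PySem.List.index?_eq_idxOf?]) u
    simpa using this
  -- A's double fold is the same flatMap
  rw [PySem.List.foldl_congr_mem l _ (fun result kv => result ++
      kv.1.filterMap (fun kw => (PySem.List.index? ws kw).map
        (fun i => (PySem.Str.join " " (ws.take i ++ ws.drop (i + 1)), kv.2)))) []
      (fun acc kv _ => pvInnerA ws kv.2 kv.1 acc)]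
  rw [PySem.List.foldl_append_eq_flatMap]
  rw [List.nil_append]
  show _ = l.flatMap (fun kv => kv.1.filterMap (fun kw =>
    ((((PySem.List.enumerate ws 0).foldl
        (pvStep2 n (((PySem.List.enumerate ws 0).reverse.foldl (pvStep1 n)
          (PySem.Dict.empty, "")).1)) (PySem.Dict.empty, "")).1).get? kw).map
      (fun s => (s, kv.2))))
  congr 1
  funext kv
  congr 1
  funext kw
  rw [hremoved kw]
  cases PySem.List.index? ws kw <;> simp
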